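-- pv_equiv track=rewrite | github.com/gbrllpauline/cmsc128-ay2015-16-assign001-py | payawal.py | numberDelimited
-- ===== SOURCE A (Python) =====
-- def numberDelimited(num, delimiter, index):
-- 	index = len(str(num)) - int(index)							#computes how many jumps from right to left needed
-- 	count = 0													#check number of digit is equal to required jump
-- 	result = ""													#holds the result
-- 	for char in str(num):
-- 		if count == index:										#if count is equal to required jump, appends the delimiter first before adding the digit
-- 			result += delimiter
-- 		result += char
-- 		count += 1
-- 	if count == index:
-- 		result += delimiter										#if jump == len(str), prepend the delimiter to result
-- 	return result
-- ===== SOURCE B (Python) =====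
-- def numberDelimited(num, delimiter, index):
--     s = str(num)
--     pos = len(s) - int(index)
--     if 0 <= pos <= len(s):
--         return s[:pos] + delimiter + s[pos:]
--     return s
-- ===== Notes on version B (the rewrite author's own statement) =====
-- stated objective: simpler
-- what changed: Replaced the per-character accumulation loop with a guarded position computation and two string slices joined around the delimiter.
import Mathlib
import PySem

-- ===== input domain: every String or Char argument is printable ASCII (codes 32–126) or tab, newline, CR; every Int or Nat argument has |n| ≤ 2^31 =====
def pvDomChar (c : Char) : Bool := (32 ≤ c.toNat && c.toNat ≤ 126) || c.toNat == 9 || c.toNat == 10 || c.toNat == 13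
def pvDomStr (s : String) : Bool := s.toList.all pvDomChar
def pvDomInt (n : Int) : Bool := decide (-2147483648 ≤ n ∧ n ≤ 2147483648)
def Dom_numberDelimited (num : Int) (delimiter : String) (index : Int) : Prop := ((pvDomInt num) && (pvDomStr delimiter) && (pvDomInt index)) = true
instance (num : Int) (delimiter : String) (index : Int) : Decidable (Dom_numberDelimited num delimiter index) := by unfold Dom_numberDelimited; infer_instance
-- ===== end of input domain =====

-- B replaces A's per-character accumulation loop by a guarded position and two slices (objective: simpler).

-- ===== PORT A =====
-- literal transliteration of A: counter loop over the digits of str(num), inserting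
-- the delimiter when the counter equals len(str(num)) - index, plus the post-loop check
def numberDelimited (num : Int) (delimiter : String) (index : Int) : String :=
  let s := PySem.Int.toChars num
  let idx : Int := (s.length : Int) - index
  let st := s.foldl (fun (st : Int × List Char) c =>
      let r := if st.1 = idx then st.2 ++ delimiter.toList else st.2
      (st.1 + 1, r ++ [c])) (0, [])
  let result := if st.1 = idx then st.2 ++ delimiter.toList else st.2
  String.ofList result

-- ===== PORT B =====
-- literal transliteration of B: s[:pos] + delimiter + s[pos:] when 0 <= pos <= len(s)
-- (guard makes take/drop on pos.toNat exact for the slices), else s unchanged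
def numberDelimited_alt (num : Int) (delimiter : String) (index : Int) : String :=
  let s := PySem.Int.toChars num
  let pos : Int := (s.length : Int) - index
  if 0 ≤ pos ∧ pos ≤ (s.length : Int) then
    String.ofList (s.take pos.toNat ++ delimiter.toList ++ s.drop pos.toNat)
  else
    String.ofList s

-- ===== PRECONDITION & SPEC =====
def Spec_numberDelimited (num : Int) (delimiter : String) (index : Int) (out : String) : Prop := out = numberDelimited_alt num delimiter index
instance (num : Int) (delimiter : String) (index : Int) (out : String) : Decidable (Spec_numberDelimited num delimiter index out) := by unfold Spec_numberDelimited; infer_instance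

-- ===== CLAIM (what is proved, stated in full; the proofs are below) =====
def Claim_equal_numberDelimited : Prop := ∀ (num : Int) (delimiter : String) (index : Int), Dom_numberDelimited num delimiter index → Spec_numberDelimited num delimiter index (numberDelimited num delimiter index)

-- ===== LEMMAS AND PROOFS =====

/-- The string A's loop builds, positionally: insert `d` before the char at offset `p`. -/
def insAt (d : List Char) : List Char → Int → List Char
  | [], _ => []
  | c :: cs, p => (if p = 0 then d else []) ++ c :: insAt d cs (p - 1)

theorem insAt_neg (d : List Char) (cs : List Char) (p : Int) (hp : p < 0) :
    insAt d cs p = cs := by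
  induction cs generalizing p with
  | nil => rfl
  | cons c cs ih =>
    simp [insAt, ih (p - 1) (by omega), if_neg (by omega : ¬ p = 0)]

theorem loop_eq (d : List Char) (idx : Int) (cs : List Char) (k : Int) (acc : List Char) :
    cs.foldl (fun (st : Int × List Char) c =>
      let r := if st.1 = idx then st.2 ++ d else st.2
      (st.1 + 1, r ++ [c])) (k, acc)
    = (k + cs.length, acc ++ insAt d cs (idx - k)) := by
  induction cs generalizing k acc with
  | nil => simp [insAt]
  | cons c cs ih =>
    simp only [List.foldl_cons, ih, Prod.mk.injEq]
    refine ⟨by push_cast [List.length_cons]; ring, ?_⟩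
    rw [show idx - (k + 1) = (idx - k) - 1 by ring]
    simp only [insAt]
    by_cases h : k = idx
    · subst h
      simp [sub_self]
    · rw [if_neg h, if_neg (by omega : ¬ idx - k = 0)]
      simp

theorem insAt_full (d : List Char) (cs : List Char) (p : Int) :
    insAt d cs p ++ (if (cs.length : Int) = p then d else [])
    = if 0 ≤ p ∧ p ≤ (cs.length : Int) then
        cs.take p.toNat ++ d ++ cs.drop p.toNat
      else cs := by
  induction cs generalizing p with
  | nil =>
    simp only [insAt, List.length_nil, Nat.cast_zero, List.take_nil, List.drop_nil,
      List.nil_append, List.append_nil]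
    by_cases h : p = 0
    · subst h; simp
    · rw [if_neg (by omega), if_neg (by omega)]
  | cons c cs ih =>
    by_cases h0 : p = 0
    · subst h0
      have hneg : insAt d cs (-1) = cs := insAt_neg d cs _ (by omega)
      simp [insAt]
      rw [hneg, if_neg (by omega : ¬ ((cs.length : Int) + 1 = 0)),
        if_pos (by omega : (0 : Int) ≤ (cs.length : Int) + 1)]
      simp
    · have hlen : ((c :: cs).length : Int) = (cs.length : Int) + 1 := by
        simp [List.length_cons]
      by_cases hr : 0 ≤ p ∧ p ≤ ((c :: cs).length : Int)
      · obtain ⟨hr1, hr2⟩ := hr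
        rw [hlen] at hr2
        have h1 : 0 ≤ p - 1 ∧ p - 1 ≤ (cs.length : Int) := by omega
        have hnat : p.toNat = (p - 1).toNat + 1 := by omega
        have htake : (c :: cs).take p.toNat = c :: cs.take (p - 1).toNat := by
          rw [hnat]; simp [List.take_succ_cons]
        have hdrop : (c :: cs).drop p.toNat = cs.drop (p - 1).toNat := by
          rw [hnat]; simp [List.drop_succ_cons]
        have hrr : 0 ≤ p ∧ p ≤ ((c :: cs).length : Int) := ⟨hr1, by rw [hlen]; omega⟩
        simp only [insAt, if_neg h0, if_pos hrr, htake, hdrop]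
        rw [List.nil_append, List.cons_append, List.append_assoc]
        rw [show (if ((c :: cs).length : Int) = p then d else [])
              = (if (cs.length : Int) = p - 1 then d else []) by
            rw [hlen]
            by_cases h : (cs.length : Int) = p - 1
            · rw [if_pos (by omega), if_pos h]
            · rw [if_neg (by omega), if_neg h]]
        rw [ih (p - 1), if_pos h1]
        simp
      · have hr' : ¬ (0 ≤ p ∧ p ≤ (cs.length : Int) + 1) := by rw [hlen] at hr; exact hr
        have h1 : ¬ (0 ≤ p - 1 ∧ p - 1 ≤ (cs.length : Int)) := by omega
        have htail : ¬ ((c :: cs).length : Int) = p := by rw [hlen]; omega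
        have htail2 : ¬ ((cs.length : Int) = p - 1) := by omega
        simp only [insAt, if_neg h0, if_neg hr, if_neg htail, List.nil_append,
          List.append_nil]
        have := ih (p - 1)
        rw [if_neg h1, if_neg htail2] at this
        simp only [List.append_nil] at this
        rw [this]

-- ===== VERDICT (by name: the statement is the Claim_ definition above) =====
theorem numberDelimited_spec : Claim_equal_numberDelimited := by
  intro num delimiter index _
  show _ = _
  unfold numberDelimited numberDelimited_alt
  simp only [loop_eq, sub_zero, List.nil_append]
  rw [show ((0 : Int) + (PySem.Int.toChars num).length
        = ((PySem.Int.toChars num).length : Int)) by ring]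
  rw [show (if ((PySem.Int.toChars num).length : Int)
          = ((PySem.Int.toChars num).length : Int) - index then
          insAt delimiter.toList (PySem.Int.toChars num)
            (((PySem.Int.toChars num).length : Int) - index) ++ delimiter.toList
        else insAt delimiter.toList (PySem.Int.toChars num)
            (((PySem.Int.toChars num).length : Int) - index))
      = insAt delimiter.toList (PySem.Int.toChars num)
          (((PySem.Int.toChars num).length : Int) - index)
        ++ (if ((PySem.Int.toChars num).length : Int)
              = ((PySem.Int.toChars num).length : Int) - index
            then delimiter.toList else []) by
    split <;> simp]
  rw [insAt_full]
  split <;> rfl
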